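-- pv_equiv track=rewrite | github.com/DPNT-Sourcecode/CHK-facp01 | lib/solutions/CHK/checkout_solution.py | multi_buy_discount
-- ===== SOURCE A (Python) =====
-- SpecialOffers = { 'A':[(3,130),(5,200),(1,50)], 'B':[(2,45),(1,30)], 'C':[(1,20)], 'D':[(1,15)], 'E':[(1,40)], \
-- 		'F':[(1,10)], \
-- 		'G':[(1,20)], \
-- 		'H':[(5,45),(10,80),(1,10)],   # 5H for 45, 10H for 80 \
-- 		'I':[(1,35)], \
-- 		'J':[(1,60)], \
-- 		'K':[(1,70), (2,120)], 	# 2K for 150 \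
-- 		'L':[(1,90)], \
-- 		'M':[(1,15)], \
-- 		'N':[(1,40)], \
-- 		'O':[(1,10)], \
-- 		'P':[(1,50),(5,200)], \
-- 		'Q':[(1,30),(3,80)], \
-- 		'R':[(1,50)], \
-- 		'S':[(1,20)], \
-- 		'T':[(1,20)], \
-- 		'U':[(1,40)], \
-- 		'V':[(1,50),(2,90),(3,130)], \
-- 		'W':[(1,20)], \
-- 		'X':[(1,17)], \
-- 		'Y':[(1,20)], \
-- 		'Z':[(1,21)] }
--
-- MultiBuyGoods = "STXYZ"
--
-- def debug(*argv): pass	# comment out for additional debug...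
--
-- def price_sku(cc, num=1 ):   # B 2
--     '''
--     Price a SKU (or multiple) eg. BBB => B 3
--     '''
--     grand_tot = 0
--     so = SpecialOffers.get(cc,())		# B => [(2,45),(1,30)]
--     so = sorted(so,reverse=True)   		# sort is descending order
--
--
--     for ss in so: 						# loop through special offers
--         #debug ('price_sku '+'-'*10, cc, num, ss)
--         s0,s1 = ss[0], ss[1]
--         n0 =  (num//s0);
--         num -= n0 * s0
--         #debug (s0,s1,n0,num)
--         tot = (n0*s1);
--         grand_tot += tot
--         debug (cc,tot,grand_tot)
--     return grand_tot
--
-- def price_good(good):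
--     tot = 0
--     for c in good:
--     	tot += price_sku(c)
--     return tot
--
-- def sort_multi_buys(goods):
-- 	''' crude method to sort good in price order descending '''
-- 	goods2 = [(price_sku(g),g) for g in goods]
-- 	debug (goods2)
-- 	goods3 = sorted(goods2,reverse=True)   # comm: [(21, 'Z'), (20, 'S'), (20, 'S'), (20, 'S')]
-- 	gg = [x[1] for x in goods3[:3]]
-- 	return gg
--
-- def multi_buy_discount(goods):
-- 	comm = []
-- 	for g in goods:
-- 		if g in MultiBuyGoods:
-- 			comm.append(g)
-- 	comm = sort_multi_buys(comm)
-- 	discount = 0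
-- 	pcomm = 0
-- 	numMB = 0
-- 	if len(comm) >= 3:
-- 		numMB = (len(comm) // 3)			# we may have groups of 3 mutlipbuys
-- 		numMBgoods = numMB * 3			# we may have groups of 3 mutlipbuys
-- 		pcomm = price_good(list(comm)[:numMBgoods])	# which 3 do we price?
-- 		discount = pcomm - (45*numMB)
-- 	debug ("goods: {} comm: {} numMB: {} pcomm: {} discount: {}".format(goods,comm,numMB,pcomm,discount))
-- 	return discount
-- ===== SOURCE B (Python) =====
-- MB_PRICE = {'S': 20, 'T': 20, 'X': 17, 'Y': 20, 'Z': 21}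
--
-- def multi_buy_discount(goods):
--     prices = sorted((MB_PRICE.get(g, 0) for g in goods if g in "STXYZ"), reverse=True)
--     if len(prices) >= 3:
--         return sum(prices[:3]) - 45
--     return 0
-- ===== Notes on version B (the rewrite author's own statement) =====
-- stated objective: simpler
-- what changed: Replaces the (price,good)-tuple sort, take-3-names, and separate re-pricing pass (price_good with its per-SKU special-offer sort-and-fold) by one direct computation on a single price list: filter-and-price in one pass via a small price table, sort the prices descending, sum the top three minus 45.
import Mathlib
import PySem

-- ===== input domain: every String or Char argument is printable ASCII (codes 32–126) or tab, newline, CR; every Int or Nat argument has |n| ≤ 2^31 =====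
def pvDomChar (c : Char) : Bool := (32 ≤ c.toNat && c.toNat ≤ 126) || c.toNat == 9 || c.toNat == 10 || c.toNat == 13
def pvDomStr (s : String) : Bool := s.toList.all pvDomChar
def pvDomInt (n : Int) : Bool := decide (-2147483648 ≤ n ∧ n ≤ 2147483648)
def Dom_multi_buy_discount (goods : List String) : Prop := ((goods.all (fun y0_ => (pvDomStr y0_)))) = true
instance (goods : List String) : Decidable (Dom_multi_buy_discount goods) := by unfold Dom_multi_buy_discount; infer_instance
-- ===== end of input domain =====

-- B replaces A's (price,good)-tuple sort + take-3-names + separate re-pricing pass by one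
-- sorted price list: filter-and-price in one pass, sort descending, sum the top three minus 45.

-- ===== PORT A =====
def pvSpecialOffers : PySem.Dict String (List (Int × Int)) := PySem.Dict.ofList
  [("A",[(3,130),(5,200),(1,50)]), ("B",[(2,45),(1,30)]), ("C",[(1,20)]), ("D",[(1,15)]),
   ("E",[(1,40)]), ("F",[(1,10)]), ("G",[(1,20)]), ("H",[(5,45),(10,80),(1,10)]),
   ("I",[(1,35)]), ("J",[(1,60)]), ("K",[(1,70),(2,120)]), ("L",[(1,90)]), ("M",[(1,15)]),
   ("N",[(1,40)]), ("O",[(1,10)]), ("P",[(1,50),(5,200)]), ("Q",[(1,30),(3,80)]),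
   ("R",[(1,50)]), ("S",[(1,20)]), ("T",[(1,20)]), ("U",[(1,40)]), ("V",[(1,50),(2,90),(3,130)]),
   ("W",[(1,20)]), ("X",[(1,17)]), ("Y",[(1,20)]), ("Z",[(1,21)])]

def pvMultiBuyGoods : String := "STXYZ"

-- price_sku(cc, num=1): fold over the descending-sorted special offers, state = (grand_tot, num)
def price_sku (cc : String) (num : Int) : Int :=
  let so := PySem.Dict.getD pvSpecialOffers cc []
  let so := PySem.List.sorted2 so Prod.fst Prod.snd true
  (so.foldl (fun st ss =>
      let s0 := ss.1
      let s1 := ss.2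
      let n0 := PySem.Int.floordiv st.2 s0
      let num' := st.2 - n0 * s0
      let tot := n0 * s1
      (st.1 + tot, num')) ((0 : Int), num)).1

def price_good (good : List String) : Int :=
  good.foldl (fun tot c => tot + price_sku c 1) 0

def sort_multi_buys (goods : List String) : List String :=
  let goods2 := goods.map (fun g => (price_sku g 1, g))
  let goods3 := PySem.List.sorted2 goods2 Prod.fst Prod.snd true
  (PySem.List.slice goods3 none (some 3)).map (fun x => x.2)

def multi_buy_discount (goods : List String) : Int :=
  let comm := goods.foldl (fun acc g => if PySem.Str.isIn g pvMultiBuyGoods then acc ++ [g] else acc) []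
  let comm := sort_multi_buys comm
  if 3 ≤ (comm.length : Int) then
    let numMB := PySem.Int.floordiv (comm.length : Int) 3
    let numMBgoods := numMB * 3
    let pcomm := price_good (PySem.List.slice comm none (some numMBgoods))
    pcomm - 45 * numMB
  else (0 : Int)

-- ===== PORT B =====
def pvMBPrice : PySem.Dict String Int := PySem.Dict.ofList [("S",20),("T",20),("X",17),("Y",20),("Z",21)]

def multi_buy_discount_alt (goods : List String) : Int :=
  let prices := PySem.List.sorted
      ((goods.filter (fun g => PySem.Str.isIn g "STXYZ")).map (fun g => PySem.Dict.getD pvMBPrice g 0))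
      (fun x => x) true
  if 3 ≤ prices.length then (PySem.List.slice prices none (some 3)).sum - 45
  else (0 : Int)

-- ===== PRECONDITION & SPEC =====
def Spec_multi_buy_discount (goods : List String) (out : Int) : Prop := out = multi_buy_discount_alt goods
instance (goods : List String) (out : Int) : Decidable (Spec_multi_buy_discount goods out) := by unfold Spec_multi_buy_discount; infer_instance

-- ===== CLAIM (what is proved, stated in full; the proofs are below) =====
def Claim_equal_multi_buy_discount : Prop := ∀ (goods : List String), Dom_multi_buy_discount goods → Spec_multi_buy_discount goods (multi_buy_discount goods)

-- ===== LEMMAS AND PROOFS =====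

-- A's single-letter multi-buy price equals B's table price, for every good the filter admits
-- (the admitted goods are exactly the 32 subsequences of "STXYZ" that occur as substrings; the
-- non-single-letter ones price to 0 on both sides).
theorem pv_price_eq (g : String) (h : PySem.Str.isIn g pvMultiBuyGoods = true) :
    price_sku g 1 = PySem.Dict.getD pvMBPrice g 0 := by
  have h2 : List.Sublist g.toList "STXYZ".toList :=
    (List.IsInfix.sublist ((PySem.Str.isIn_iff_infix g pvMultiBuyGoods).mp h))
  have h3 : g.toList ∈ ("STXYZ".toList).sublists := List.mem_sublists.mpr h2
  rw [show ("STXYZ".toList).sublists = [[], ['S'], ['T'], ['S','T'], ['X'], ['S','X'], ['T','X'], ['S','T','X'],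
    ['Y'], ['S','Y'], ['T','Y'], ['S','T','Y'], ['X','Y'], ['S','X','Y'], ['T','X','Y'], ['S','T','X','Y'],
    ['Z'], ['S','Z'], ['T','Z'], ['S','T','Z'], ['X','Z'], ['S','X','Z'], ['T','X','Z'], ['S','T','X','Z'],
    ['Y','Z'], ['S','Y','Z'], ['T','Y','Z'], ['S','T','Y','Z'], ['X','Y','Z'], ['S','X','Y','Z'], ['T','X','Y','Z'],
    ['S','T','X','Y','Z']] from by decide] at h3
  simp only [List.mem_cons, List.not_mem_nil, or_false] at h3
  rw [← String.ofList_toList (s := g)]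
  rcases h3 with h|h|h|h|h|h|h|h|h|h|h|h|h|h|h|h|h|h|h|h|h|h|h|h|h|h|h|h|h|h|h|h <;> rw [h] <;> decide

-- insertBy with a comparator that respects the fst-descending order preserves fst-descending Pairwise
theorem pv_insertBy_pw (before : (Int × String) → (Int × String) → Bool)
    (h1 : ∀ a b, before a b = true → b.1 ≤ a.1) (h2 : ∀ a b, before a b = false → a.1 ≤ b.1)
    (x : Int × String) : ∀ ys : List (Int × String), ys.Pairwise (fun a b => b.1 ≤ a.1) →
    (PySem.List.insertBy before x ys).Pairwise (fun a b => b.1 ≤ a.1) := by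
  intro ys
  induction ys with
  | nil => intro _; simp [PySem.List.insertBy]
  | cons y ys ih =>
    intro hp
    rw [List.pairwise_cons] at hp
    obtain ⟨hy, hys⟩ := hp
    by_cases hb : before x y = true
    · simp only [PySem.List.insertBy, hb, if_true]
      refine List.Pairwise.cons ?_ (List.Pairwise.cons hy hys)
      intro z hz
      rcases List.mem_cons.mp hz with rfl | hz
      · exact h1 _ _ hb
      · exact le_trans (hy z hz) (h1 _ _ hb)
    · have hb' : before x y = false := by simpa using hb
      simp only [PySem.List.insertBy, hb', Bool.false_eq_true, if_false]
      refine List.Pairwise.cons ?_ (ih hys)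
      intro z hz
      rcases (PySem.List.mem_insertBy before x z ys).mp hz with rfl | hz
      · exact h2 _ _ hb'
      · exact hy z hz

-- the tuple sort sorted2 _ fst snd true is fst-descending
theorem pv_sorted2_pairwise (xs : List (Int × String)) :
    (PySem.List.sorted2 xs Prod.fst Prod.snd true).Pairwise (fun a b => b.1 ≤ a.1) := by
  rw [PySem.List.sorted2]
  generalize hacc : ([] : List (Int × String)) = acc
  have hh : acc.Pairwise (fun (a b : Int × String) => b.1 ≤ a.1) := by rw [← hacc]; simp
  clear hacc
  induction xs generalizing acc with
  | nil => simpa using hh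
  | cons x xs ih =>
    simp only [List.foldl_cons]
    exact ih _ (pv_insertBy_pw _ (by intro a b hb; simp at hb; rcases hb with h | ⟨h, _⟩ <;> omega)
      (by intro a b hb; simp at hb; omega) x acc hh)

-- ===== VERDICT (by name: the statement is the Claim_ definition above) =====
theorem multi_buy_discount_spec : Claim_equal_multi_buy_discount := by
  intro goods _
  unfold Spec_multi_buy_discount multi_buy_discount multi_buy_discount_alt sort_multi_buys price_good
  rw [show ("STXYZ" : String) = pvMultiBuyGoods from rfl]
  simp only [PySem.List.foldl_append_if_eq_filter, List.nil_append]
  set filt := goods.filter (fun g => PySem.Str.isIn g pvMultiBuyGoods) with hfilt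
  set pairs := filt.map (fun g => (price_sku g 1, g)) with hpairs
  set g3 := PySem.List.sorted2 pairs Prod.fst Prod.snd true with hg3
  set prices := PySem.List.sorted (filt.map fun g => PySem.Dict.getD pvMBPrice g 0) (fun x => x) true with hprices
  have hperm : g3.Perm pairs := PySem.List.sorted2_perm pairs Prod.fst Prod.snd true
  have hlen3 : g3.length = filt.length := by rw [hperm.length_eq, hpairs, List.length_map]
  have hpperm : prices.Perm (filt.map fun g => PySem.Dict.getD pvMBPrice g 0) :=
    PySem.List.sorted_perm _ _ _
  have hplen : prices.length = filt.length := by rw [hpperm.length_eq, List.length_map]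
  have hmapeq : filt.map (fun g => price_sku g 1) = filt.map (fun g => PySem.Dict.getD pvMBPrice g 0) :=
    List.map_congr_left (fun g hg => pv_price_eq g ((List.mem_filter.mp hg).2))
  have hX : g3.map Prod.fst = prices := by
    refine PySem.List.eq_of_perm_of_pairwise_le_of_injective (fun n : Int => -n)
      (fun a b hab => by dsimp only at hab; omega) ?_ ?_ ?_
    · refine ((hperm.map Prod.fst).trans ?_).trans hpperm.symm
      rw [hpairs, List.map_map]
      exact (List.Perm.refl _).trans (hmapeq ▸ List.Perm.refl _)
    · exact (List.pairwise_map.mpr ((pv_sorted2_pairwise pairs).imp (fun h => by dsimp only; omega)))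
    · exact (PySem.List.sorted_pairwise_rev _ _).imp (fun h => by dsimp only at *; omega)
  have hfst : ∀ p ∈ g3, price_sku p.2 1 = p.1 := by
    intro p hp
    have hp2 : p ∈ pairs := hperm.mem_iff.mp hp
    rw [hpairs] at hp2
    obtain ⟨g, _, rfl⟩ := List.mem_map.mp hp2
    rfl
  rw [PySem.List.slice_to (b := 3) _ (by norm_num)]
  by_cases hn : 3 ≤ filt.length
  · simp only [show (3:Int).toNat = 3 from rfl]
    have hc : (((g3.take 3).map (fun x => x.2)).length : Int) = 3 := by
      simp [hlen3]; omega
    rw [if_pos (by omega), hc]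
    have hdiv : PySem.Int.floordiv (3:Int) 3 = 1 := by decide
    rw [hdiv]
    rw [PySem.List.slice_to _ (by norm_num : (0:Int) ≤ 1*3)]
    simp only [show ((1*3:Int)).toNat = 3 from rfl]
    rw [List.take_of_length_le (by simp [hlen3])]
    rw [PySem.List.foldl_add ((g3.take 3).map (fun x => x.2)) (fun c => price_sku c 1) 0]
    rw [if_pos (by omega)]
    rw [PySem.List.slice_to (b := 3) _ (by norm_num)]
    simp only [show (3:Int).toNat = 3 from rfl]
    have hmm : ((g3.take 3).map (fun x => x.2)).map (fun c => price_sku c 1) = (g3.take 3).map Prod.fst := by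
      rw [List.map_map]
      exact List.map_congr_left (fun p hp => hfst p (List.mem_of_mem_take hp))
    rw [hmm, List.map_take, hX]
    ring
  · rw [if_neg (by simp only [List.length_map, List.length_take, hlen3]; omega),
        if_neg (by omega)]
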